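-- pv_equiv track=rewrite | github.com/JminJ/Algorithm | Programers/sort/H_index.py | solution
-- ===== SOURCE A (Python) =====
-- def solution(citations):
--     answer = 0
--
--     # citations의 unique 값들만 list로 만든다
--     c_ts = list(set(citations))
--
--     if len(citations) < 2:
--         answer = citations[0]
--
--     # c_ts의 max값 까지 for문을 돌린다.
--     for h in range(max(c_ts)):
--         cnt = 0
--         # h값과 citations값을 비교
--         for i in range(len(citations)):
--             # citations[i]값이 h보다 크거나 같으면 cnt에 1을 더한다.
--             if citations[i] >= h:
--                 cnt += 1
--         # cnt가 h이상이라면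
--         if cnt >= h:
--             # cnt가 len(citations-cnt) 이상이라면
--             if cnt >= (len(citations) - cnt):
--                 # h가 answer 아상이라면 answer를 h로 바꿈
--                 if answer < h:
--                     answer = h
--
--     return answer
-- ===== SOURCE B (Python) =====
-- def solution(citations):
--     # h-index with majority condition: largest h in [1, n] such that at least h
--     # papers have >= h citations and those papers are at least half of all papers.
--     # Sort once, then a single two-pointer sweep: for increasing h the number of
--     # papers below h only grows, so cnt(>=h) = n - i is maintained in O(1).
--     a = sorted(citations)
--     n = len(a)
--     best = 0
--     i = 0
--     for h in range(1, n + 1):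
--         while i < n and a[i] < h:
--             i += 1
--         cnt = n - i
--         if cnt >= h and 2 * cnt >= n:
--             best = h
--     return best
-- ===== Notes on version B (the rewrite author's own statement) =====
-- stated objective: faster
-- what changed: A brute-forces every candidate h in range(max(citations)) and recounts the whole list for each (O(max*n)); B sorts once and does a single two-pointer sweep over h in 1..n, maintaining cnt(>=h) incrementally, so the citation magnitude no longer drives the cost.
-- intended difference: On singleton lists with citations[0] outside {0,1} A returns citations[0] itself, and on lists of length >= 2 whose maximum m >= 1 itself satisfies the acceptance condition (count(>=m) >= m and is a majority) A returns at most m-1 because range(max) never tests h = m; B returns the genuine largest qualifying h (0/1, resp. m), which is the intended value. — e.g. on solution([1, 1, 1]): A returns 0, B returns 1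
import Mathlib
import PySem

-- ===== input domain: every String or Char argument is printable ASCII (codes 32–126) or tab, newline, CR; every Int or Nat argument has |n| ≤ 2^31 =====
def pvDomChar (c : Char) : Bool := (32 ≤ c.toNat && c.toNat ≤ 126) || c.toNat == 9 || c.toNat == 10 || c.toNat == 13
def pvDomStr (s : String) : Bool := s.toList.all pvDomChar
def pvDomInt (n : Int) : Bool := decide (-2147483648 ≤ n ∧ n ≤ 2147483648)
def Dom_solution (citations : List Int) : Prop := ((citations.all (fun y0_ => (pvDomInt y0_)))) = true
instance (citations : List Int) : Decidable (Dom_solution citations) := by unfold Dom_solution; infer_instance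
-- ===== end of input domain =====

-- B replaces A's exhaustive O(max·n) scan of every h in range(max) by sort + one
-- two-pointer sweep over h ≤ n (O(n log n)); where A's loop bound or singleton
-- shortcut make A miss the genuine answer, B returns the intended value (see D_).


-- ===== PORT A =====
-- literal port of A; the pyGetD/.getD 0 defaults are only reached on [] (excluded by Pre_)
def solution (citations : List Int) : Int :=
  let c_ts : List Int := PySem.Set.ofList citations
  let answer : Int := if citations.length < 2 then PySem.List.pyGetD citations 0 0 else 0
  (PySem.List.pyRange 0 ((PySem.List.max? c_ts (fun x => x)).getD 0) 1).foldl
    (fun answer h =>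
      let cnt : Int := (PySem.List.pyRange 0 (citations.length : Int) 1).foldl
        (fun cnt i => if PySem.List.pyGetD citations i 0 ≥ h then cnt + 1 else cnt) 0
      if cnt ≥ h then
        if cnt ≥ (citations.length : Int) - cnt then
          if answer < h then h else answer
        else answer
      else answer)
    answer

-- ===== PORT B =====
-- while i < n and a[i] < h: i += 1   (a[i] with 0 <= i < n, so .getD is exact here;
-- the fuel argument a.length bounds the iterations, which never exceed a.length - i)
def altAdv (a : List Int) (h : Int) (i : Nat) : Nat → Nat
  | 0 => i
  | fuel + 1 => if i < a.length ∧ a.getD i 0 < h then altAdv a h (i + 1) fuel else i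

def solution_alt (citations : List Int) : Int :=
  let a := PySem.List.sorted citations (fun x => x) false
  ((PySem.List.pyRange 1 ((a.length : Int) + 1) 1).foldl
    (fun (st : Int × Nat) h =>
      let i := altAdv a h st.2 a.length
      let cnt : Int := (a.length : Int) - (i : Int)
      (if cnt ≥ h ∧ 2 * cnt ≥ (a.length : Int) then h else st.1, i))
    (0, 0)).1

-- ===== PRECONDITION & SPEC =====
-- count of elements ≥ h — input-shape helper for D_
def cntGe (citations : List Int) (h : Int) : Int := (citations.countP (fun c => c ≥ h) : Int)

-- A raises on the empty list (IndexError on citations[0]); nothing else raises.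
def Pre_solution (citations : List Int) : Prop := citations ≠ []
instance (citations : List Int) : Decidable (Pre_solution citations) := by unfold Pre_solution; infer_instance
def pvWitness_solution : List Int := [3, 0, 6, 1, 5]

-- On singleton lists with citations[0] ∉ {0,1} A returns citations[0] itself, and on
-- lists of length ≥ 2 whose maximum m ≥ 1 itself satisfies the acceptance condition
-- (cntGe m ≥ m and a majority) A returns at most m-1 because range(max) never tests
-- h = m; B returns the genuine largest qualifying h (0/1, resp. m), the intended value.
def D_solution (citations : List Int) : Prop :=
  if citations.length = 1 then ∀ x ∈ citations, x < 0 ∨ 2 ≤ x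
  else ∃ m ∈ citations, (∀ x ∈ citations, x ≤ m) ∧ 1 ≤ m ∧
    m ≤ cntGe citations m ∧ (citations.length : Int) ≤ 2 * cntGe citations m
instance (citations : List Int) : Decidable (D_solution citations) := by unfold D_solution; infer_instance

def Spec_solution (citations : List Int) (out : Int) : Prop :=
  ¬ D_solution citations → out = solution_alt citations
instance (citations : List Int) (out : Int) : Decidable (Spec_solution citations out) := by unfold Spec_solution; infer_instance

def pvDiffWitness_solution : List Int := [1, 1, 1]
def pvDiffWitnessOut_solution : Int × Int := (0, 1)

-- ===== CLAIM (what is proved, stated in full; the proofs are below) =====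
def Claim_unchanged_solution : Prop := ∀ (citations : List Int), Dom_solution citations → Pre_solution citations → Spec_solution citations (solution citations)
def Claim_changed_solution : Prop := Dom_solution (pvDiffWitness_solution) ∧ Pre_solution (pvDiffWitness_solution) ∧ D_solution (pvDiffWitness_solution) ∧ solution (pvDiffWitness_solution) = pvDiffWitnessOut_solution.1 ∧ solution_alt (pvDiffWitness_solution) = pvDiffWitnessOut_solution.2 ∧ pvDiffWitnessOut_solution.1 ≠ pvDiffWitnessOut_solution.2
def Claim_exact_solution : Prop := ∀ (citations : List Int), Dom_solution citations → Pre_solution citations → D_solution citations → solution citations ≠ solution_alt citations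

-- ===== LEMMAS AND PROOFS =====

-- the maximum of the list (0 on [])
def maxC (citations : List Int) : Int := (PySem.List.max? citations (fun x => x)).getD 0

-- the acceptance condition both programs test for a candidate h
abbrev Q (citations : List Int) (h : Int) : Prop :=
  cntGe citations h ≥ h ∧ 2 * cntGe citations h ≥ (citations.length : Int)

-- A's update function after the inner count loop is abstracted out
def gA (citations : List Int) (a h : Int) : Int :=
  if Q citations h ∧ a < h then h else a

theorem map_getD_range (xs : List Int) (d : Int) :
    (List.range xs.length).map (fun k => xs.getD k d) = xs := by
  apply List.ext_getElem
  · simp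
  · intro i h1 h2
    simp [List.getD_eq_getElem?_getD, List.getElem?_eq_getElem h2]

theorem countP_getD_range (xs : List Int) (d : Int) (p : Int → Bool) :
    (List.range xs.length).countP (fun k => p (xs.getD k d)) = xs.countP p := by
  conv_rhs => rw [← map_getD_range xs d]
  rw [List.countP_map]
  rfl

theorem cntA_eq (citations : List Int) (h : Int) :
    (PySem.List.pyRange 0 (citations.length : Int) 1).foldl
      (fun cnt i => if PySem.List.pyGetD citations i 0 ≥ h then cnt + 1 else cnt) 0
    = cntGe citations h := by
  rw [PySem.List.pyRange_zero_nat, List.foldl_map, PySem.List.foldl_ite_add_one]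
  simp only [PySem.List.pyGetD_natCast]
  rw [countP_getD_range citations 0 (fun c => decide (c ≥ h))]
  simp [cntGe]

theorem cntGe_bounds (citations : List Int) (h : Int) :
    0 ≤ cntGe citations h ∧ cntGe citations h ≤ (citations.length : Int) := by
  unfold cntGe
  have := List.countP_le_length (p := fun c => decide (c ≥ h)) (l := citations)
  omega

theorem bodyA_eq (citations : List Int) (a h : Int) :
    (fun (answer h : Int) =>
      let cnt : Int := (PySem.List.pyRange 0 (citations.length : Int) 1).foldl
        (fun cnt i => if PySem.List.pyGetD citations i 0 ≥ h then cnt + 1 else cnt) 0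
      if cnt ≥ h then
        if cnt ≥ (citations.length : Int) - cnt then
          if answer < h then h else answer
        else answer
      else answer) a h = gA citations a h := by
  simp only [cntA_eq, gA, Q]
  split_ifs <;> omega

theorem foldA (citations : List Int) (L : List Int) (a : Int) :
    a ≤ L.foldl (gA citations) a ∧
    (L.foldl (gA citations) a = a ∨
      (L.foldl (gA citations) a ∈ L ∧ Q citations (L.foldl (gA citations) a))) ∧
    ∀ h ∈ L, Q citations h → h ≤ L.foldl (gA citations) a := by
  induction L generalizing a with
  | nil => simp
  | cons z t ih =>
    simp only [List.foldl_cons]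
    by_cases hz : Q citations z ∧ a < z
    · have hgz : gA citations a z = z := by
        simp only [gA]; rw [if_pos hz]
      rw [hgz]
      obtain ⟨ih1, ih2, ih3⟩ := ih z
      refine ⟨by omega, ?_, ?_⟩
      · rcases ih2 with h2 | ⟨hm, hq⟩
        · right
          rw [h2]
          exact ⟨List.mem_cons_self, hz.1⟩
        · exact Or.inr ⟨List.mem_cons_of_mem _ hm, hq⟩
      · intro h hh hq
        rcases List.mem_cons.mp hh with rfl | hmem
        · exact ih1
        · exact ih3 h hmem hq
    · have hgz : gA citations a z = a := by
        simp only [gA]; rw [if_neg hz]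
      rw [hgz]
      obtain ⟨ih1, ih2, ih3⟩ := ih a
      refine ⟨ih1, ?_, ?_⟩
      · rcases ih2 with h2 | ⟨hm, hq⟩
        · exact Or.inl h2
        · exact Or.inr ⟨List.mem_cons_of_mem _ hm, hq⟩
      · intro h hh hq
        rcases List.mem_cons.mp hh with rfl | hmem
        · have : ¬ a < h := fun hlt => hz ⟨hq, hlt⟩
          omega
        · exact ih3 h hmem hq

theorem foldA_frozen (citations : List Int) (L : List Int) (a : Int)
    (hle : ∀ h ∈ L, h ≤ a) : L.foldl (gA citations) a = a := by
  induction L with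
  | nil => rfl
  | cons z t ih =>
    have hza := hle z List.mem_cons_self
    have hz : gA citations a z = a := by
      simp only [gA]
      split_ifs with hcond
      · omega
      · rfl
    rw [List.foldl_cons, hz]
    exact ih (fun h hh => hle h (List.mem_cons_of_mem _ hh))

theorem max_set_eq (citations : List Int) (hne : citations ≠ []) :
    (PySem.List.max? (PySem.Set.ofList citations) (fun x => x)).getD 0
    = maxC citations := by
  have hne2 : (PySem.Set.ofList citations : List Int) ≠ [] := by
    intro h
    rcases List.exists_mem_of_ne_nil citations hne with ⟨x, hx⟩
    have : x ∈ (PySem.Set.ofList citations : List Int) := (PySem.Set.mem_ofList _ _).mpr hx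
    simp [h] at this
  unfold maxC
  cases hms : PySem.List.max? (PySem.Set.ofList citations) (fun x => x) with
  | none => exact absurd ((PySem.List.max?_eq_none_iff _ _).mp hms) hne2
  | some ms =>
    cases hml : PySem.List.max? citations (fun x => x) with
    | none => exact absurd ((PySem.List.max?_eq_none_iff _ _).mp hml) hne
    | some ml =>
      have hms_mem : ms ∈ citations := (PySem.Set.mem_ofList _ _).mp (PySem.List.max?_mem hms)
      have hml_mem : ml ∈ (PySem.Set.ofList citations : List Int) :=
        (PySem.Set.mem_ofList _ _).mpr (PySem.List.max?_mem hml)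
      have h1 : ms ≤ ml := PySem.List.max?_isMax hml ms hms_mem
      have h2 : ml ≤ ms := PySem.List.max?_isMax hms ml hml_mem
      simp [le_antisymm h1 h2]

theorem solution_eq_fold (citations : List Int) :
    solution citations =
      (PySem.List.pyRange 0 ((PySem.List.max? (PySem.Set.ofList citations) (fun x => x)).getD 0) 1).foldl
        (gA citations)
        (if citations.length < 2 then PySem.List.pyGetD citations 0 0 else 0) := by
  simp only [solution]
  apply PySem.List.foldl_congr_mem
  intro a h _
  exact bodyA_eq citations a h

-- A on a singleton returns its element: every h in range(max [x]) is < x = answer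
theorem solutionA_single (x : Int) : solution [x] = x := by
  have hmax : PySem.List.max? [x] (fun y => y) = some x := by
    rw [PySem.List.max?_id_cons]; rfl
  have hset : (PySem.Set.ofList [x] : List Int) = [x] := rfl
  rw [solution_eq_fold, hset, hmax]
  have hlen : ([x] : List Int).length < 2 := by simp
  rw [if_pos hlen, PySem.List.pyGetD_zero_cons]
  apply foldA_frozen
  intro h hh
  have := (PySem.List.mem_pyRange_one).mp hh
  simp only [Option.getD_some] at this
  omega

-- ---- B side ----

-- B's fold step, named for the proofs (definitionally the lambda in solution_alt)
def stepB (a : List Int) (st : Int × Nat) (h : Int) : Int × Nat :=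
  let i := altAdv a h st.2 a.length
  let cnt : Int := (a.length : Int) - (i : Int)
  (if cnt ≥ h ∧ 2 * cnt ≥ (a.length : Int) then h else st.1, i)

-- the acceptance condition as B's sweep sees it, over the sorted list a
def QB (a : List Int) (h : Int) : Prop :=
  (a.length : Int) - (a.countP (fun x => x < h) : Int) ≥ h ∧
  2 * ((a.length : Int) - (a.countP (fun x => x < h) : Int)) ≥ (a.length : Int)

theorem getD_lt_of_lt_countP (a : List Int) (hs : a.Pairwise (· ≤ ·)) (h : Int) (j : Nat)
    (hj : j < a.countP (fun x => x < h)) : j < a.length ∧ a.getD j 0 < h := by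
  have hjl : j < a.length := lt_of_lt_of_le hj List.countP_le_length
  refine ⟨hjl, ?_⟩
  by_contra hge
  push_neg at hge
  have hcnt : a.countP (fun x => x < h) ≤ j := by
    have hsplit : a.countP (fun x => x < h)
        = (a.take j).countP (fun x => x < h) + (a.drop j).countP (fun x => x < h) := by
      rw [← List.countP_append, List.take_append_drop]
    have h1 : (a.take j).countP (fun x => x < h) ≤ j := by
      calc (a.take j).countP (fun x => x < h) ≤ (a.take j).length := List.countP_le_length
        _ ≤ j := by simp [List.length_take]
    have h2 : (a.drop j).countP (fun x => x < h) = 0 := by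
      rw [List.countP_eq_zero]
      intro x hx
      obtain ⟨k, hk, hxk⟩ := (List.mem_iff_getElem).mp hx
      have hkl : j + k < a.length := by
        simp [List.length_drop] at hk
        omega
      have hxv : x = a[j + k] := by rw [← hxk, List.getElem_drop]
      have hmono : a[j] ≤ a[j + k] := by
        rcases Nat.eq_or_lt_of_le (Nat.le_add_right j k) with heq | hlt
        · simp [← heq]
        · exact (List.pairwise_iff_getElem.mp hs) j (j + k) hjl hkl hlt
      have hgj : a.getD j 0 = a[j] := List.getD_eq_getElem a 0 hjl
      simp only [decide_eq_true_eq]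
      push_neg
      rw [hxv]
      calc h ≤ a.getD j 0 := hge
        _ = a[j] := hgj
        _ ≤ a[j + k] := hmono
    omega
  omega

-- the stopping state i = countP (· < h): everything before i is < h, a[i] (if any) is ≥ h
theorem countP_eq_of_stop (a : List Int) (h : Int) (i : Nat)
    (hil : i ≤ a.length) (hlt : ∀ j, j < i → a.getD j 0 < h)
    (hstop : ¬ (i < a.length ∧ a.getD i 0 < h)) (hs : a.Pairwise (· ≤ ·)) :
    a.countP (fun x => x < h) = i := by
  have hle : i ≤ a.countP (fun x => x < h) := by
    have hmono : (a.take i).countP (fun x => x < h) ≤ a.countP (fun x => x < h) := by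
      conv_rhs => rw [← List.take_append_drop i a]
      rw [List.countP_append]
      omega
    have htake : (a.take i).countP (fun x => x < h) = (a.take i).length := by
      rw [List.countP_eq_length]
      intro x hx
      obtain ⟨k, hk, hxk⟩ := (List.mem_iff_getElem).mp hx
      have hki : k < i := by simp [List.length_take] at hk; omega
      have hkl : k < a.length := by simp [List.length_take] at hk; omega
      have hxv : x = a.getD k 0 := by
        rw [List.getD_eq_getElem a 0 hkl, ← hxk, List.getElem_take]
      simp only [decide_eq_true_eq]
      rw [hxv]
      exact hlt k hki
    have hlen : (a.take i).length = i := by simp [List.length_take]; omega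
    omega
  have hge : a.countP (fun x => x < h) ≤ i := by
    by_contra hgt
    push_neg at hgt
    exact hstop (getD_lt_of_lt_countP a hs h i hgt)
  omega

-- the while loop lands on countP (· < h) whenever everything before i is < h
theorem altAdv_eq (a : List Int) (hs : a.Pairwise (· ≤ ·)) (h : Int) (i fuel : Nat)
    (hfuel : a.length ≤ i + fuel)
    (hil : i ≤ a.length) (hlt : ∀ j, j < i → a.getD j 0 < h) :
    altAdv a h i fuel = a.countP (fun x => x < h) := by
  induction fuel generalizing i with
  | zero =>
    have : i = a.length := by omega
    subst this
    rw [altAdv]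
    exact (countP_eq_of_stop a h a.length le_rfl hlt (by omega) hs).symm
  | succ fuel ih =>
    rw [altAdv]
    by_cases hc : i < a.length ∧ a.getD i 0 < h
    · rw [if_pos hc]
      exact ih (i + 1) (by omega) hc.1
        (fun j hj => by
          rcases Nat.lt_succ_iff_lt_or_eq.mp hj with hj' | rfl
          · exact hlt j hj'
          · exact hc.2)
    · rw [if_neg hc]
      exact (countP_eq_of_stop a h i hil hlt hc hs).symm

-- cnt = n - countP(< h) on the sorted list is the count of elements ≥ h of the original
theorem cntB_eq (citations : List Int) (h : Int) :
    ((PySem.List.sorted citations (fun x => x) false).length : Int)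
      - ((PySem.List.sorted citations (fun x => x) false).countP (fun x => x < h) : Int)
    = cntGe citations h := by
  set a := PySem.List.sorted citations (fun x => x) false with ha
  have hperm : a.Perm citations := PySem.List.sorted_perm citations _ _
  have hsum : a.countP (fun x => x < h) + a.countP (fun x => x ≥ h) = a.length := by
    clear hperm ha
    induction a with
    | nil => simp
    | cons z tl ih =>
      simp only [List.countP_cons, decide_eq_true_eq, List.length_cons]
      by_cases hz : z < h
      · rw [if_pos hz, if_neg (by omega : ¬ z ≥ h)]
        omega
      · rw [if_neg hz, if_pos (by omega : z ≥ h)]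
        omega
  have hcnt : a.countP (fun x => x ≥ h) = citations.countP (fun x => x ≥ h) :=
    hperm.countP_eq _
  unfold cntGe
  rw [← hcnt]
  omega

theorem QB_iff_Q (citations : List Int) (h : Int) :
    QB (PySem.List.sorted citations (fun x => x) false) h ↔ Q citations h := by
  have hc := cntB_eq citations h
  have hl : (PySem.List.sorted citations (fun x => x) false).length = citations.length :=
    (PySem.List.sorted_perm citations _ _).length_eq
  unfold QB Q
  rw [hc, hl]

-- B's fold invariant: after processing h = 1..t the pointer is ≤ length with only
-- elements < t+1 before it, and best is the maximal h in [1,t] with QB (0 if none)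
theorem foldB (a : List Int) (hs : a.Pairwise (· ≤ ·)) (t : Nat) :
    ((PySem.List.pyRange 1 ((t : Int) + 1) 1).foldl (stepB a) (0, 0)).2 ≤ a.length ∧
    (∀ j, j < ((PySem.List.pyRange 1 ((t : Int) + 1) 1).foldl (stepB a) (0, 0)).2 →
      a.getD j 0 < (t : Int) + 1) ∧
    (((PySem.List.pyRange 1 ((t : Int) + 1) 1).foldl (stepB a) (0, 0)).1 = 0 ∨
      (1 ≤ ((PySem.List.pyRange 1 ((t : Int) + 1) 1).foldl (stepB a) (0, 0)).1 ∧
        ((PySem.List.pyRange 1 ((t : Int) + 1) 1).foldl (stepB a) (0, 0)).1 ≤ (t : Int) ∧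
        QB a (((PySem.List.pyRange 1 ((t : Int) + 1) 1).foldl (stepB a) (0, 0)).1))) ∧
    (∀ h : Int, 1 ≤ h → h ≤ (t : Int) → QB a h →
      h ≤ ((PySem.List.pyRange 1 ((t : Int) + 1) 1).foldl (stepB a) (0, 0)).1) := by
  induction t with
  | zero =>
    rw [show ((0 : Nat) : Int) + 1 = 1 by norm_num, PySem.List.pyRange_one_eq_nil le_rfl]
    refine ⟨by simp, by simp, Or.inl rfl, ?_⟩
    intro h h1 h2 _
    simp at h2 ⊢
    omega
  | succ t ih =>
    have hsplit : PySem.List.pyRange 1 (((t + 1 : Nat) : Int) + 1) 1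
        = PySem.List.pyRange 1 ((t : Int) + 1) 1 ++ [(t : Int) + 1] := by
      have hcast : (((t + 1 : Nat) : Int) + 1) = ((t : Int) + 1) + 1 := by push_cast; ring
      rw [hcast, PySem.List.pyRange_one_succ_right (by omega)]
    rw [hsplit, List.foldl_append, List.foldl_cons, List.foldl_nil]
    obtain ⟨ih1, ih2, ih3, ih4⟩ := ih
    set st := (PySem.List.pyRange 1 ((t : Int) + 1) 1).foldl (stepB a) (0, 0) with hst
    have hadv : altAdv a ((t : Int) + 1) st.2 a.length = a.countP (fun x => x < (t : Int) + 1) :=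
      altAdv_eq a hs ((t : Int) + 1) st.2 a.length (by omega) ih1 ih2
    have hnew2 : (stepB a st ((t : Int) + 1)).2 = a.countP (fun x => x < (t : Int) + 1) := by
      simp only [stepB, hadv]
    have hcle : a.countP (fun x => x < (t : Int) + 1) ≤ a.length := List.countP_le_length
    refine ⟨?_, ?_, ?_, ?_⟩
    · rw [hnew2]; exact hcle
    · intro j hj
      rw [hnew2] at hj
      have := (getD_lt_of_lt_countP a hs ((t : Int) + 1) j hj).2
      push_cast
      omega
    · by_cases hq : QB a ((t : Int) + 1)
      · have hfire : (stepB a st ((t : Int) + 1)).1 = (t : Int) + 1 := by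
          simp only [stepB, hadv]
          rw [if_pos ⟨hq.1, hq.2⟩]
        rw [hfire]
        exact Or.inr ⟨by omega, by push_cast; omega, hq⟩
      · have hfrozen : (stepB a st ((t : Int) + 1)).1 = st.1 := by
          simp only [stepB, hadv]
          rw [if_neg (fun hcond => hq ⟨hcond.1, hcond.2⟩)]
        rw [hfrozen]
        rcases ih3 with h0 | ⟨hb1, hb2, hb3⟩
        · exact Or.inl h0
        · exact Or.inr ⟨hb1, by push_cast; omega, hb3⟩
    · intro h h1 h2 hqh
      by_cases hq : QB a ((t : Int) + 1)
      · have hfire : (stepB a st ((t : Int) + 1)).1 = (t : Int) + 1 := by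
          simp only [stepB, hadv]
          rw [if_pos ⟨hq.1, hq.2⟩]
        rw [hfire]
        push_cast at h2
        omega
      · have hfrozen : (stepB a st ((t : Int) + 1)).1 = st.1 := by
          simp only [stepB, hadv]
          rw [if_neg (fun hcond => hq ⟨hcond.1, hcond.2⟩)]
        rw [hfrozen]
        have hne : h ≠ (t : Int) + 1 := fun heq => hq (heq ▸ hqh)
        push_cast at h2
        exact ih4 h h1 (by omega) hqh

-- B's result characterised: the maximal qualifying h in [1, n], or 0
theorem solution_alt_char (citations : List Int) :
    (solution_alt citations = 0 ∨
      (1 ≤ solution_alt citations ∧ solution_alt citations ≤ (citations.length : Int) ∧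
        Q citations (solution_alt citations))) ∧
    ∀ h : Int, 1 ≤ h → h ≤ (citations.length : Int) → Q citations h →
      h ≤ solution_alt citations := by
  have hl : (PySem.List.sorted citations (fun x => x) false).length = citations.length :=
    (PySem.List.sorted_perm citations _ _).length_eq
  have hs : (PySem.List.sorted citations (fun x => x) false).Pairwise (· ≤ ·) := by
    have := PySem.List.sorted_pairwise citations (fun x => x)
    simpa using this
  have heq : solution_alt citations
      = ((PySem.List.pyRange 1
            (((PySem.List.sorted citations (fun x => x) false).length : Int) + 1) 1).foldl
          (stepB (PySem.List.sorted citations (fun x => x) false)) (0, 0)).1 := rfl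
  obtain ⟨_, _, h3, h4⟩ :=
    foldB (PySem.List.sorted citations (fun x => x) false) hs
      (PySem.List.sorted citations (fun x => x) false).length
  rw [← heq] at h3 h4
  constructor
  · rcases h3 with h0 | ⟨hb1, hb2, hb3⟩
    · exact Or.inl h0
    · exact Or.inr ⟨hb1, by rw [hl] at hb2; exact hb2, (QB_iff_Q citations _).mp hb3⟩
  · intro h h1 h2 hq
    exact h4 h h1 (by rw [hl]; exact h2) ((QB_iff_Q citations h).mpr hq)

-- the maximum is an element
theorem maxC_mem (citations : List Int) (hne : citations ≠ []) : maxC citations ∈ citations := by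
  unfold maxC
  cases hml : PySem.List.max? citations (fun y => y) with
  | none => exact absurd ((PySem.List.max?_eq_none_iff _ _).mp hml) hne
  | some ml => simpa using PySem.List.max?_mem hml

-- every element is at most the maximum
theorem le_maxC (citations : List Int) (hne : citations ≠ []) (x : Int) (hx : x ∈ citations) :
    x ≤ maxC citations := by
  unfold maxC
  cases hml : PySem.List.max? citations (fun y => y) with
  | none => exact absurd ((PySem.List.max?_eq_none_iff _ _).mp hml) hne
  | some ml => simpa using PySem.List.max?_isMax hml x hx

-- a qualifying h ≥ 1 is at most the maximum (some element is ≥ h)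
theorem q_le_maxC (citations : List Int) (hne : citations ≠ []) (h : Int)
    (h1 : 1 ≤ h) (hq : Q citations h) : h ≤ maxC citations := by
  obtain ⟨hq1, _⟩ := hq
  have hpos : 0 < citations.countP (fun c => c ≥ h) := by
    unfold cntGe at hq1
    omega
  obtain ⟨x, hx, hxh⟩ := List.countP_pos_iff.mp hpos
  simp only [decide_eq_true_eq] at hxh
  calc h ≤ x := hxh
    _ ≤ maxC citations := le_maxC citations hne x hx

-- a qualifying h is at most n
theorem q_le_len (citations : List Int) (h : Int) (hq : Q citations h) :
    h ≤ (citations.length : Int) := by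
  obtain ⟨hq1, _⟩ := hq
  have := cntGe_bounds citations h
  omega

-- ===== VERDICT (by name: the statement is the Claim_ definition above) =====
theorem solution_spec : Claim_unchanged_solution := by
  intro citations _ hpre
  unfold Spec_solution
  intro hnD
  match citations with
  | [] => exact absurd rfl hpre
  | [x] =>
    have hx : ¬ (x < 0 ∨ 2 ≤ x) := by
      intro hor
      apply hnD
      unfold D_solution
      rw [if_pos (by simp)]
      intro z hz
      rw [List.mem_singleton] at hz
      subst hz
      exact hor
    have hx01 : x = 0 ∨ x = 1 := by omega
    rw [solutionA_single]
    rcases hx01 with rfl | rfl <;> decide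
  | x :: y :: tl =>
    have hne : (x :: y :: tl : List Int) ≠ [] := by simp
    have hnDm : ¬ (1 ≤ maxC (x :: y :: tl) ∧ Q (x :: y :: tl) (maxC (x :: y :: tl))) := by
      intro hand
      apply hnD
      unfold D_solution
      rw [if_neg (by simp)]
      exact ⟨maxC (x :: y :: tl), maxC_mem _ hne, fun z hz => le_maxC _ hne z hz,
        hand.1, hand.2.1, hand.2.2⟩
    have hlen : ¬ (x :: y :: tl : List Int).length < 2 := by simp
    rw [solution_eq_fold, if_neg hlen, max_set_eq _ hne]
    set cs : List Int := x :: y :: tl with hcs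
    set L := PySem.List.pyRange 0 (maxC cs) 1 with hL
    obtain ⟨hA1, hA2, hA3⟩ := foldA cs L 0
    obtain ⟨hB1, hB2⟩ := solution_alt_char cs
    set r := L.foldl (gA cs) 0 with hr
    set s := solution_alt cs with hsv
    have hs0 : 0 ≤ s := by rcases hB1 with h1 | ⟨h1, _⟩ <;> omega
    apply le_antisymm
    · rcases hA2 with h2 | ⟨hrmem, hq⟩
      · omega
      · by_cases hrz : r = 0
        · omega
        · exact hB2 r (by omega) (q_le_len cs r hq) hq
    · rcases hB1 with h1 | ⟨h1, h2, hq⟩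
      · omega
      · have hsm : s ≤ maxC cs := q_le_maxC cs hne s h1 hq
        have hsne : s ≠ maxC cs := by
          intro heqq
          rw [heqq] at hq h1
          exact hnDm ⟨h1, hq⟩
        refine hA3 s ?_ hq
        rw [hL, PySem.List.mem_pyRange_one]
        omega

theorem solution_changed : Claim_changed_solution := by
  unfold Claim_changed_solution; decide

theorem solution_tight : Claim_exact_solution := by
  intro citations _ hpre hD
  obtain ⟨hB1, hB2⟩ := solution_alt_char citations
  unfold D_solution at hD
  by_cases hlen1 : citations.length = 1
  · rw [if_pos hlen1] at hD
    have hx := hD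
    match citations, hlen1 with
    | [x], _ =>
      have hx := hx x List.mem_cons_self
      rw [solutionA_single]
      obtain ⟨hB1, _⟩ := solution_alt_char [x]
      intro heq
      rcases hB1 with h0 | ⟨h1, h2, _⟩
      · omega
      · simp at h2
        omega
  · rw [if_neg hlen1] at hD
    obtain ⟨m, hmem, hub, hm1, hqm1, hqm2⟩ := hD
    have hne : citations ≠ [] := List.ne_nil_of_mem hmem
    have hlen2 : 2 ≤ citations.length := by
      have h1 : 1 ≤ citations.length := List.length_pos_of_mem hmem
      omega
    have hmeq : m = maxC citations :=
      le_antisymm (le_maxC citations hne m hmem) (hub _ (maxC_mem citations hne))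
    rw [hmeq] at hm1 hqm1 hqm2
    have hqm : Q citations (maxC citations) := ⟨hqm1, hqm2⟩
    have hsge : maxC citations ≤ solution_alt citations :=
      hB2 (maxC citations) hm1 (q_le_len citations _ hqm) hqm
    have hlen : ¬ citations.length < 2 := by omega
    rw [solution_eq_fold, if_neg hlen, max_set_eq citations hne]
    obtain ⟨_, hA2, _⟩ := foldA citations (PySem.List.pyRange 0 (maxC citations) 1) 0
    rcases hA2 with h0 | ⟨hmem, _⟩
    · rw [h0]; omega
    · have := (PySem.List.mem_pyRange_one).mp hmem
      omega
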